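-- pv_equiv track=rewrite | github.com/AEWorthy/MonStim-Analyzer | monstim_gui/dialogs/data_curation_manager.py | _build_highlight_html
-- ===== SOURCE A (Python) =====
-- def _build_highlight_html(texts, tokens):
--     """Return a list of HTML strings with matched substrings highlighted.
--
--     tokens: already-parsed tokens including quoted phrases and qualifiers; qualifiers highlight their value.
--     """
--     try:
--
--         def norm(s):
--             return str(s or "")
--
--         # Extract highlight words from tokens (handle quoted and key:value)
--         highlights = []
--         for t in tokens:
--             t = t.strip()
--             if not t:
--                 continue
--             if t.startswith('"') and t.endswith('"'):
--                 highlights.append(t[1:-1])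
--             elif ":" in t:
--                 _, v = t.split(":", 1)
--                 if v:
--                     highlights.append(v)
--             else:
--                 highlights.append(t)
--
--         def highlight_text(text):
--             s = norm(text)
--             if not s or not highlights:
--                 return s
--             # Build case-insensitive replacements with span; avoid overlapping by scanning
--             lower = s.lower()
--             ranges = []
--             for h in highlights:
--                 hl = str(h).lower()
--                 start = 0
--                 while True:
--                     idx = lower.find(hl, start)
--                     if idx == -1:
--                         break
--                     ranges.append((idx, idx + len(hl)))
--                     start = idx + len(hl)
--             # Merge overlapping ranges
--             ranges.sort()
--             merged = []
--             for st, en in ranges: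
--                 if not merged or st > merged[-1][1]:
--                     merged.append((st, en))
--                 else:
--                     merged[-1] = (merged[-1][0], max(merged[-1][1], en))
--             # Build HTML
--             out = []
--             last = 0
--             for st, en in merged:
--                 out.append(s[last:st])
--                 span = s[st:en]
--                 out.append(f"<span style='background-color:#ffec99;color:#000;'>{span}</span>")
--                 last = en
--             out.append(s[last:])
--             return "".join(out)
--
--         return [highlight_text(t) for t in texts]
--     except Exception:
--         return texts
-- ===== SOURCE B (Python) =====
-- def _build_highlight_html(texts, tokens):
--     """Return a list of HTML strings with matched substrings highlighted."""
--     try: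
--         def token_highlight(t):
--             t = t.strip()
--             if not t:
--                 return None
--             if t.startswith('"') and t.endswith('"'):
--                 return t[1:-1]
--             if ":" in t:
--                 v = t.split(":", 1)[1]
--                 return v if v else None
--             return t
--
--         highlights = [h for h in map(token_highlight, tokens) if h is not None]
--
--         def highlight_text(text):
--             s = str(text or "")
--             if not s or not highlights:
--                 return s
--             lower = s.lower()
--             # Boolean coverage mask instead of a ranges list + sort + merge.
--             covered = [False] * len(s)
--             for h in highlights:
--                 hl = str(h).lower()
--                 start = 0
--                 while True:
--                     idx = lower.find(hl, start)
--                     if idx == -1: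
--                         break
--                     covered[idx:idx + len(hl)] = [True] * len(hl)
--                     start = idx + len(hl)
--             # Emit maximal runs of equal coverage.
--             out = []
--             i = 0
--             n = len(s)
--             while i < n:
--                 j = i
--                 while j < n and covered[j] == covered[i]:
--                     j += 1
--                 if covered[i]:
--                     out.append(f"<span style='background-color:#ffec99;color:#000;'>{s[i:j]}</span>")
--                 else:
--                     out.append(s[i:j])
--                 i = j
--             return "".join(out)
--
--         return [highlight_text(t) for t in texts]
--     except Exception:
--         return texts
-- ===== Notes on version B (the rewrite author's own statement) =====
-- stated objective: simpler
-- what changed: Replaces A's ranges list + sort + interval-merge + segment assembly by a boolean coverage mask filled by the same case-insensitive find loop and scanned once into maximal plain/highlighted runs; token parsing becomes a per-token function with a comprehension.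
import Mathlib
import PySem

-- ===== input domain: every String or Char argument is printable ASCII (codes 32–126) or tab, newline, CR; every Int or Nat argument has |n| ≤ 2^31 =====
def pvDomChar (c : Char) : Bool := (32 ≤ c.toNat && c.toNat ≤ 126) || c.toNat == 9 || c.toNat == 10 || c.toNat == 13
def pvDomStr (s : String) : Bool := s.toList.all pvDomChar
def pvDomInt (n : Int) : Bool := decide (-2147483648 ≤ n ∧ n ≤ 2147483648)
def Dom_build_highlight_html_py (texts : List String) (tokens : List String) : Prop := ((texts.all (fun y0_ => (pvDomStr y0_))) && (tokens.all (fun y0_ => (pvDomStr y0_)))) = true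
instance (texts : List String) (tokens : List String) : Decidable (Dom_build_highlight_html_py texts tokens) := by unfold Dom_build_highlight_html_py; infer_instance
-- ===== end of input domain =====

-- B replaces A's ranges-list + sort + interval-merge by a boolean coverage mask scanned once
-- (objective: simpler); same token parsing, same inner find loop, byte-identical HTML.

-- ===== PORT A =====

-- f"<span style='background-color:#ffec99;color:#000;'>{span}</span>"
def pvSpanA (span : List Char) : List Char :=
  "<span style='background-color:#ffec99;color:#000;'>".toList ++ span ++ "</span>".toList

-- body of A's token loop: the list (0 or 1 elements) appended to `highlights` for one token
def pvTokStepA (t : String) : List (List Char) :=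
  let t := PySem.Chars.strip t.toList
  if t = [] then []
  else if PySem.Chars.startswith t ['"'] && PySem.Chars.endswith t ['"'] then
    [PySem.Chars.slice t (some 1) (some (-1))]
  else if PySem.Chars.isIn [':'] t then
    -- `_, v = t.split(":", 1)`; ':' ∈ t so the split has exactly two parts
    let v := (PySem.Chars.splitOnMax t [':'] 1).getD 1 []
    if v ≠ [] then [v] else []
  else [t]

def pvHighlightsA (tokens : List String) : List (List Char) :=
  tokens.foldl (fun hs t => hs ++ pvTokStepA t) []

-- `while True: idx = lower.find(hl, start) …`; fuel = len(lower)+1 suffices whenever hl ≠ ""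
def pvFindLoopA (lower hl : List Char) (fuel : Nat) (start : Nat) (acc : List (Nat × Nat)) :
    List (Nat × Nat) :=
  match fuel with
  | 0 => acc
  | fuel + 1 =>
    let idx := PySem.Chars.findFrom lower hl (start : Int)
    if idx = -1 then acc
    else pvFindLoopA lower hl fuel (idx.toNat + hl.length) (acc ++ [(idx.toNat, idx.toNat + hl.length)])

def pvMergeStepA (merged : List (Nat × Nat)) (r : Nat × Nat) : List (Nat × Nat) :=
  match merged.getLast? with
  | none => merged ++ [r]
  | some m => if m.2 < r.1 then merged ++ [r] else merged.dropLast ++ [(m.1, max m.2 r.2)]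

def pvMergeA (ranges : List (Nat × Nat)) : List (Nat × Nat) :=
  ranges.foldl pvMergeStepA []

def pvBuildA (s : List Char) (merged : List (Nat × Nat)) : List Char :=
  let ol := merged.foldl (fun (p : List (List Char) × Nat) r =>
    (p.1 ++ [PySem.Chars.slice s (some (p.2 : Int)) (some (r.1 : Int)),
             pvSpanA (PySem.Chars.slice s (some (r.1 : Int)) (some (r.2 : Int)))], r.2)) ([], 0)
  PySem.Chars.join [] (ol.1 ++ [PySem.Chars.slice s (some (ol.2 : Int)) none])

-- norm(text) = text for a str argument (str(s or "") is s itself, or "" which equals s when s is empty)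
def pvHighlightTextA (highlights : List (List Char)) (text : String) : String :=
  let s := text.toList
  if s = [] ∨ highlights = [] then text
  else
    let lower := PySem.Chars.lower s
    let ranges := highlights.foldl
      (fun acc h => pvFindLoopA lower (PySem.Chars.lower h) (lower.length + 1) 0 acc) []
    String.ofList (pvBuildA s (pvMergeA (PySem.List.sorted2 ranges (fun r => r.1) (fun r => r.2))))

def build_highlight_html_py (texts : List String) (tokens : List String) : List String :=
  texts.map (pvHighlightTextA (pvHighlightsA tokens))

-- ===== PORT B =====

def pvTokenHighlightB (t : String) : Option (List Char) :=
  let t := PySem.Chars.strip t.toList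
  if t = [] then none
  else if PySem.Chars.startswith t ['"'] && PySem.Chars.endswith t ['"'] then
    some (PySem.Chars.slice t (some 1) (some (-1)))
  else if PySem.Chars.isIn [':'] t then
    let v := (PySem.Chars.splitOnMax t [':'] 1).getD 1 []
    if v ≠ [] then some v else none
  else some t

def pvHighlightsB (tokens : List String) : List (List Char) :=
  (tokens.map pvTokenHighlightB).filterMap id

-- covered[i:i+len] = [True]*len  (slice assignment; here i+len ≤ len(covered) whenever find succeeded)
def pvSetRangeB (cov : List Bool) (i len : Nat) : List Bool :=
  cov.take i ++ List.replicate len true ++ cov.drop (i + len)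

def pvMarkLoopB (lower hl : List Char) (fuel : Nat) (start : Nat) (cov : List Bool) : List Bool :=
  match fuel with
  | 0 => cov
  | fuel + 1 =>
    let idx := PySem.Chars.findFrom lower hl (start : Int)
    if idx = -1 then cov
    else pvMarkLoopB lower hl fuel (idx.toNat + hl.length) (pvSetRangeB cov idx.toNat hl.length)

-- `while j < n and covered[j] == covered[i]: j += 1`
def pvRunEndB (cov : List Bool) (b : Bool) (fuel j : Nat) : Nat :=
  match fuel with
  | 0 => j
  | fuel + 1 => if j < cov.length ∧ cov.getD j false = b then pvRunEndB cov b fuel (j + 1) else j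

-- `while i < n:` emit one maximal run per iteration
def pvScanB (s : List Char) (cov : List Bool) (fuel : Nat) (i : Nat) (out : List (List Char)) :
    List (List Char) :=
  match fuel with
  | 0 => out
  | fuel + 1 =>
    if i < s.length then
      let j := pvRunEndB cov (cov.getD i false) (cov.length + 1 - i) i
      let seg := PySem.Chars.slice s (some (i : Int)) (some (j : Int))
      pvScanB s cov fuel j (out ++ [if cov.getD i false then
        "<span style='background-color:#ffec99;color:#000;'>".toList ++ seg ++ "</span>".toList
      else seg])
    else out

def pvHighlightTextB (highlights : List (List Char)) (text : String) : String :=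
  let s := text.toList
  if s = [] ∨ highlights = [] then text
  else
    let lower := PySem.Chars.lower s
    let cov := highlights.foldl
      (fun c h => pvMarkLoopB lower (PySem.Chars.lower h) (lower.length + 1) 0 c)
      (List.replicate s.length false)
    String.ofList (PySem.Chars.join [] (pvScanB s cov s.length 0 []))

def build_highlight_html_py_alt (texts : List String) (tokens : List String) : List String :=
  texts.map (pvHighlightTextB (pvHighlightsB tokens))

-- ===== PRECONDITION & SPEC =====

-- Pre_ excludes exactly the inputs on which Python A (and B alike) never returns: a token that parses
-- to the EMPTY highlight string (a token stripping to '"' or '""') together with at least one nonempty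
-- text makes A's `lower.find("", start)` loop run forever (start never advances).
def Pre_build_highlight_html_py (texts : List String) (tokens : List String) : Prop :=
  (∀ t ∈ tokens, PySem.Chars.strip t.toList ≠ ['"'] ∧ PySem.Chars.strip t.toList ≠ ['"', '"'])
  ∨ (∀ s ∈ texts, s = "")

instance (texts : List String) (tokens : List String) :
    Decidable (Pre_build_highlight_html_py texts tokens) := by
  unfold Pre_build_highlight_html_py; infer_instance

def pvWitness_build_highlight_html_py : List String × List String :=
  (["Hello world"], ["wor", "id:7"])

def Spec_build_highlight_html_py (texts : List String) (tokens : List String)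
    (out : List String) : Prop := out = build_highlight_html_py_alt texts tokens

instance (texts : List String) (tokens : List String) (out : List String) :
    Decidable (Spec_build_highlight_html_py texts tokens out) := by
  unfold Spec_build_highlight_html_py; infer_instance

-- ===== CLAIM (what is proved, stated in full; the proofs are below) =====
def Claim_equal_build_highlight_html_py : Prop :=
  ∀ (texts : List String) (tokens : List String), Dom_build_highlight_html_py texts tokens →
    Pre_build_highlight_html_py texts tokens →
    Spec_build_highlight_html_py texts tokens (build_highlight_html_py texts tokens)

-- ===== LEMMAS AND PROOFS =====

-- coverage of an index by a list of half-open intervals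
def pvCovB (R : List (Nat × Nat)) (k : Nat) : Bool :=
  R.any (fun r => decide (r.1 ≤ k) && decide (k < r.2))

lemma pvCovB_append (A B : List (Nat × Nat)) (k : Nat) :
    pvCovB (A ++ B) k = (pvCovB A k || pvCovB B k) := by
  simp [pvCovB]

lemma pvCovB_nil (k : Nat) : pvCovB [] k = false := rfl

lemma pvCovB_cons (r : Nat × Nat) (R : List (Nat × Nat)) (k : Nat) :
    pvCovB (r :: R) k = ((decide (r.1 ≤ k) && decide (k < r.2)) || pvCovB R k) := by
  simp [pvCovB]

lemma pvCovB_perm {A B : List (Nat × Nat)} (h : A.Perm B) (k : Nat) :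
    pvCovB A k = pvCovB B k := by
  unfold pvCovB; exact h.any_eq

-- the find loop just appends to its accumulator
lemma pvFindLoopA_acc (lower hl : List Char) (fuel start : Nat) (acc : List (Nat × Nat)) :
    pvFindLoopA lower hl fuel start acc = acc ++ pvFindLoopA lower hl fuel start [] := by
  induction fuel generalizing start acc with
  | zero => simp [pvFindLoopA]
  | succ fuel ih =>
    simp only [pvFindLoopA]
    by_cases h : PySem.Chars.findFrom lower hl (start : Int) = -1
    · simp [h]
    · simp only [if_neg h]
      rw [ih _ (acc ++ _), ih _ ([] ++ _)]
      simp

-- well-formedness of the found ranges (nonempty needle)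
lemma pvFindLoopA_wf (lower hl : List Char) (hhl : hl ≠ []) :
    ∀ (fuel start : Nat), start ≤ lower.length →
      ∀ r ∈ pvFindLoopA lower hl fuel start [], start ≤ r.1 ∧ r.1 < r.2 ∧ r.2 ≤ lower.length := by
  intro fuel
  induction fuel with
  | zero => intro start _ r hr; simp [pvFindLoopA] at hr
  | succ fuel ih =>
    intro start hstart r hr
    simp only [pvFindLoopA] at hr
    by_cases h : PySem.Chars.findFrom lower hl (start : Int) = -1
    · rw [if_pos h] at hr; simp at hr
    · rw [if_neg h] at hr
      obtain ⟨h1, h2, _⟩ := PySem.Chars.findFrom_natCast_spec lower hl start hstart h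
      have hpos : 0 < hl.length := List.length_pos_of_ne_nil hhl
      have hlen : (PySem.Chars.findFrom lower hl (start : Int)).toNat + hl.length ≤ lower.length := by
        have := h2.length_le
        simp only [List.length_drop] at this
        omega
      rw [pvFindLoopA_acc] at hr
      rcases List.mem_append.mp hr with hr | hr
      · simp only [List.nil_append, List.mem_singleton] at hr
        subst hr
        refine ⟨by omega, by simp; omega, by simpa using hlen⟩
      · obtain ⟨ha, hb, hc⟩ := ih _ hlen r hr
        exact ⟨by omega, hb, hc⟩

lemma pvSetRangeB_length (cov : List Bool) (i len : Nat) (h : i + len ≤ cov.length) :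
    (pvSetRangeB cov i len).length = cov.length := by
  simp only [pvSetRangeB, List.length_append, List.length_take, List.length_replicate,
    List.length_drop]
  omega

lemma pvSetRangeB_getD (cov : List Bool) (i len : Nat) (h : i + len ≤ cov.length) (k : Nat) :
    (pvSetRangeB cov i len).getD k false
      = (cov.getD k false || (decide (i ≤ k) && decide (k < i + len))) := by
  simp only [pvSetRangeB, List.getD_eq_getElem?_getD]
  have hlt : (List.take i cov).length = i := by simp [List.length_take]; omega
  have hlr : (List.take i cov ++ List.replicate len true).length = i + len := by
    simp only [List.length_append, List.length_replicate, hlt]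
  rcases lt_or_ge k i with hk | hk
  · have c1 : k < (List.take i cov ++ List.replicate len true).length := by rw [hlr]; omega
    have c2 : k < (List.take i cov).length := by rw [hlt]; omega
    rw [List.getElem?_append_left c1, List.getElem?_append_left c2, List.getElem?_take, if_pos hk]
    have : ¬ i ≤ k := by omega
    simp [this]
  · rcases lt_or_ge k (i + len) with hk2 | hk2
    · have c1 : k < (List.take i cov ++ List.replicate len true).length := by rw [hlr]; omega
      have c2 : (List.take i cov).length ≤ k := by rw [hlt]; omega
      rw [List.getElem?_append_left c1, List.getElem?_append_right c2, hlt,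
        List.getElem?_replicate, if_pos (by omega)]
      have hcel : cov[k]? = some cov[k] := List.getElem?_eq_getElem (by omega)
      simp [hcel, hk, hk2]
    · have c1 : (List.take i cov ++ List.replicate len true).length ≤ k := by rw [hlr]; omega
      rw [List.getElem?_append_right c1, hlr, List.getElem?_drop]
      have harith : i + len + (k - (i + len)) = k := by omega
      rw [harith]
      have : ¬ k < i + len := by omega
      simp [this]

-- the mark loop computes exactly the coverage of the find loop's ranges
lemma pvMarkLoopB_eq_find (lower hl : List Char) (hhl : hl ≠ []) :
    ∀ (fuel start : Nat) (cov : List Bool), start ≤ lower.length → cov.length = lower.length →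
      (pvMarkLoopB lower hl fuel start cov).length = lower.length ∧
      ∀ k, (pvMarkLoopB lower hl fuel start cov).getD k false
            = (cov.getD k false || pvCovB (pvFindLoopA lower hl fuel start []) k) := by
  intro fuel
  induction fuel with
  | zero =>
    intro start cov _ hcov
    exact ⟨hcov, fun k => by simp [pvMarkLoopB, pvFindLoopA, pvCovB]⟩
  | succ fuel ih =>
    intro start cov hstart hcov
    simp only [pvMarkLoopB, pvFindLoopA]
    by_cases h : PySem.Chars.findFrom lower hl (start : Int) = -1
    · rw [if_pos h, if_pos h]
      exact ⟨hcov, fun k => by simp [pvCovB]⟩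
    · rw [if_neg h, if_neg h]
      obtain ⟨h1, h2, _⟩ := PySem.Chars.findFrom_natCast_spec lower hl start hstart h
      have hpos : 0 < hl.length := List.length_pos_of_ne_nil hhl
      have hlen : (PySem.Chars.findFrom lower hl (start : Int)).toNat + hl.length ≤ lower.length := by
        have := h2.length_le
        simp only [List.length_drop] at this
        omega
      set j := (PySem.Chars.findFrom lower hl (start : Int)).toNat with hj
      have hlen2 : j + hl.length ≤ cov.length := by rw [hcov]; exact hlen
      have hlen' : (pvSetRangeB cov j hl.length).length = lower.length := by
        rw [pvSetRangeB_length _ _ _ hlen2]; exact hcov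
      obtain ⟨IH1, IH2⟩ := ih (j + hl.length) (pvSetRangeB cov j hl.length) hlen hlen'
      refine ⟨IH1, fun k => ?_⟩
      rw [IH2 k, pvSetRangeB_getD _ _ _ hlen2 k,
        pvFindLoopA_acc lower hl fuel (j + hl.length) ([] ++ [(j, j + hl.length)]),
        pvCovB_append]
      simp only [List.nil_append]
      have hsing : pvCovB [(j, j + hl.length)] k
          = (decide (j ≤ k) && decide (k < j + hl.length)) := by simp [pvCovB]
      rw [hsing, Bool.or_assoc]

-- fold over all highlights: mask = coverage of all collected ranges
lemma pvFold_mark_eq_find (lower : List Char) (H : List (List Char))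
    (hH : ∀ h ∈ H, PySem.Chars.lower h ≠ []) :
    ∀ (acc : List (Nat × Nat)) (cov : List Bool), cov.length = lower.length →
      (∀ k, cov.getD k false = pvCovB acc k) →
      ((H.foldl (fun c h => pvMarkLoopB lower (PySem.Chars.lower h) (lower.length + 1) 0 c) cov).length
          = lower.length) ∧
      ∀ k, (H.foldl (fun c h => pvMarkLoopB lower (PySem.Chars.lower h) (lower.length + 1) 0 c) cov).getD k false
            = pvCovB (H.foldl (fun acc h => pvFindLoopA lower (PySem.Chars.lower h) (lower.length + 1) 0 acc) acc) k := by
  revert hH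
  induction H with
  | nil => intro _ acc cov h1 h2; exact ⟨h1, fun k => by simpa using h2 k⟩
  | cons h H ih =>
    intro hH acc cov hlen hcov
    have hh : PySem.Chars.lower h ≠ [] := hH h (by simp)
    have hH' : ∀ x ∈ H, PySem.Chars.lower x ≠ [] := fun x hx => hH x (by simp [hx])
    simp only [List.foldl_cons]
    obtain ⟨m1, m2⟩ := pvMarkLoopB_eq_find lower (PySem.Chars.lower h) hh (lower.length + 1) 0 cov
      (by omega) hlen
    exact ih hH' _ _ m1 (fun k => by
      rw [m2 k, hcov k, pvFindLoopA_acc lower (PySem.Chars.lower h) (lower.length + 1) 0 acc,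
        pvCovB_append])

lemma pvFold_find_wf (lower : List Char) (H : List (List Char))
    (hH : ∀ h ∈ H, PySem.Chars.lower h ≠ []) :
    ∀ acc : List (Nat × Nat), (∀ r ∈ acc, r.1 < r.2 ∧ r.2 ≤ lower.length) →
      ∀ r ∈ H.foldl (fun acc h => pvFindLoopA lower (PySem.Chars.lower h) (lower.length + 1) 0 acc) acc,
        r.1 < r.2 ∧ r.2 ≤ lower.length := by
  revert hH
  induction H with
  | nil => intro _ acc hacc r hr; exact hacc r hr
  | cons h H ih =>
    intro hH acc hacc
    have hh : PySem.Chars.lower h ≠ [] := hH h (by simp)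
    have hH' : ∀ x ∈ H, PySem.Chars.lower x ≠ [] := fun x hx => hH x (by simp [hx])
    simp only [List.foldl_cons]
    refine ih hH' _ ?_
    intro r hr
    rw [pvFindLoopA_acc] at hr
    rcases List.mem_append.mp hr with hr | hr
    · exact hacc r hr
    · obtain ⟨_, hb, hc⟩ := pvFindLoopA_wf lower (PySem.Chars.lower h) hh _ 0 (by omega) r hr
      exact ⟨hb, hc⟩

-- sorted2 output is ordered by first components
lemma pvSorted2_pairwise_fst (R : List (Nat × Nat)) :
    (PySem.List.sorted2 R (fun r => r.1) (fun r => r.2)).Pairwise (fun a b => a.1 ≤ b.1) := by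
  have hins : ∀ (x : Nat × Nat) (ys : List (Nat × Nat)),
      ys.Pairwise (fun a b => a.1 ≤ b.1) →
      (PySem.List.insertBy
        (fun a b => decide (a.1 < b.1) || (!decide (b.1 < a.1) && decide (a.2 < b.2))) x ys).Pairwise
        (fun a b => a.1 ≤ b.1) := by
    intro x ys
    induction ys with
    | nil => intro _; simp [PySem.List.insertBy]
    | cons y ys ih =>
      intro hpw
      obtain ⟨hy, hpw'⟩ := List.pairwise_cons.mp hpw
      rw [PySem.List.insertBy.eq_2]
      by_cases hb : (decide (x.1 < y.1) || (!decide (y.1 < x.1) && decide (x.2 < y.2))) = true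
      · rw [if_pos hb]
        have hxy : x.1 ≤ y.1 := by
          simp only [Bool.or_eq_true, Bool.and_eq_true, Bool.not_eq_eq_eq_not, Bool.not_true,
            decide_eq_true_eq, decide_eq_false_iff_not] at hb
          rcases hb with hb | ⟨hb, _⟩ <;> omega
        refine List.pairwise_cons.mpr ⟨?_, hpw⟩
        intro z hz
        rcases List.mem_cons.mp hz with rfl | hz
        · exact hxy
        · exact le_trans hxy (hy z hz)
      · rw [if_neg hb]
        have hyx : y.1 ≤ x.1 := by
          simp only [Bool.or_eq_true, Bool.and_eq_true, Bool.not_eq_eq_eq_not, Bool.not_true,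
            decide_eq_true_eq, decide_eq_false_iff_not] at hb
          omega
        refine List.pairwise_cons.mpr ⟨?_, ih hpw'⟩
        intro z hz
        rcases (PySem.List.mem_insertBy _ x z ys).mp hz with rfl | hz
        · exact hyx
        · exact hy z hz
  have : ∀ (S acc : List (Nat × Nat)), acc.Pairwise (fun a b => a.1 ≤ b.1) →
      (S.foldl (fun acc x => PySem.List.insertBy
        (fun a b => decide (a.1 < b.1) || (!decide (b.1 < a.1) && decide (a.2 < b.2))) x acc)
        acc).Pairwise (fun a b => a.1 ≤ b.1) := by
    intro S
    induction S with
    | nil => intro acc h; simpa using h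
    | cons x S ih =>
      intro acc h
      simp only [List.foldl_cons]
      exact ih _ (hins x acc h)
  simpa [PySem.List.sorted2] using this R [] (by simp)

-- the merge fold: separated, well-formed, coverage-preserving
lemma pvMerge_go (n : Nat) :
    ∀ (S acc : List (Nat × Nat)),
      S.Pairwise (fun a b => a.1 ≤ b.1) →
      (∀ r ∈ S, r.1 < r.2 ∧ r.2 ≤ n) →
      acc.Pairwise (fun a b => a.2 < b.1) →
      (∀ r ∈ acc, r.1 < r.2 ∧ r.2 ≤ n) →
      (∀ x ∈ S, ∀ m, acc.getLast? = some m → m.1 ≤ x.1) →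
      ((S.foldl pvMergeStepA acc).Pairwise (fun a b => a.2 < b.1) ∧
        (∀ r ∈ S.foldl pvMergeStepA acc, r.1 < r.2 ∧ r.2 ≤ n)) ∧
      ∀ k, pvCovB (S.foldl pvMergeStepA acc) k = (pvCovB acc k || pvCovB S k) := by
  intro S
  induction S with
  | nil =>
    intro acc _ _ hsep hwfacc _
    exact ⟨⟨hsep, hwfacc⟩, fun k => by simp [pvCovB]⟩
  | cons x S ih =>
    intro acc hpw hwfS hsep hwfacc hlast
    obtain ⟨hxS, hpwS⟩ := List.pairwise_cons.mp hpw
    have hxwf : x.1 < x.2 ∧ x.2 ≤ n := hwfS x (by simp)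
    have hwfS' : ∀ r ∈ S, r.1 < r.2 ∧ r.2 ≤ n := fun r hr => hwfS r (by simp [hr])
    simp only [List.foldl_cons]
    rcases hacc_last : acc.getLast? with _ | m
    · have haccnil : acc = [] := List.getLast?_eq_none_iff.mp hacc_last
      subst haccnil
      have hstep : pvMergeStepA [] x = [x] := by simp [pvMergeStepA]
      rw [hstep]
      obtain ⟨hinv, hcov⟩ := ih [x] hpwS hwfS'
        (by simp) (by simpa using hxwf)
        (fun y hy m hm => by
          simp only [List.getLast?_singleton, Option.some.injEq] at hm
          subst hm; exact hxS y hy)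
      refine ⟨hinv, fun k => ?_⟩
      rw [hcov k, pvCovB_cons]
      simp [pvCovB]
    · obtain ⟨front, rfl⟩ := List.getLast?_eq_some_iff.mp hacc_last
      have hm_wf : m.1 < m.2 ∧ m.2 ≤ n := hwfacc m (by simp)
      obtain ⟨hfront_pw, _, hfront_sep'⟩ := List.pairwise_append.mp hsep
      have hfront_sep : ∀ a ∈ front, a.2 < m.1 := fun a ha =>
        hfront_sep' a ha m (by simp)
      have hstep_last : (front ++ [m]).getLast? = some m := List.getLast?_concat
      by_cases hbr : m.2 < x.1
      · have hstep : pvMergeStepA (front ++ [m]) x = (front ++ [m]) ++ [x] := by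
          simp only [pvMergeStepA, hstep_last]
          rw [if_pos hbr]
        rw [hstep]
        obtain ⟨hinv, hcov⟩ := ih ((front ++ [m]) ++ [x]) hpwS hwfS'
          (by
            refine List.pairwise_append.mpr ⟨hsep, by simp, ?_⟩
            intro a ha b hb
            simp only [List.mem_singleton] at hb
            subst hb
            rcases List.mem_append.mp ha with ha | ha
            · have := hfront_sep a ha
              omega
            · simp only [List.mem_singleton] at ha
              subst ha; exact hbr)
          (by
            intro r hr
            rcases List.mem_append.mp hr with hr | hr
            · exact hwfacc r hr
            · simp only [List.mem_singleton] at hr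
              subst hr; exact hxwf)
          (fun y hy m' hm' => by
            rw [List.getLast?_concat] at hm'
            cases hm'
            exact hxS y hy)
        refine ⟨hinv, fun k => ?_⟩
        cases hf : pvCovB front k <;> cases hs : pvCovB S k <;>
          · rw [hcov k, Bool.eq_iff_iff]
            simp only [pvCovB_append, pvCovB_cons, pvCovB_nil, hf, hs, Bool.or_false, Bool.or_true,
              Bool.false_or, Bool.true_or, Bool.or_eq_true, Bool.and_eq_true, decide_eq_true_eq]
            try omega
      · have hx1 : m.1 ≤ x.1 := hlast x (by simp) m hacc_last
        have hx2 : x.1 ≤ m.2 := by omega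
        have hstep : pvMergeStepA (front ++ [m]) x = front ++ [(m.1, max m.2 x.2)] := by
          simp only [pvMergeStepA, hstep_last]
          rw [if_neg hbr, List.dropLast_concat]
        rw [hstep]
        obtain ⟨hinv, hcov⟩ := ih (front ++ [(m.1, max m.2 x.2)]) hpwS hwfS'
          (by
            refine List.pairwise_append.mpr ⟨hfront_pw, by simp, ?_⟩
            intro a ha b hb
            simp only [List.mem_singleton] at hb
            subst hb
            exact hfront_sep a ha)
          (by
            intro r hr
            rcases List.mem_append.mp hr with hr | hr
            · exact hwfacc r (List.mem_append.mpr (Or.inl hr))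
            · simp only [List.mem_singleton] at hr
              subst hr
              exact ⟨by simp; omega, by simp; omega⟩)
          (fun y hy m' hm' => by
            rw [List.getLast?_concat] at hm'
            cases hm'
            exact le_trans hx1 (hxS y hy))
        refine ⟨hinv, fun k => ?_⟩
        cases hf : pvCovB front k <;> cases hs : pvCovB S k <;>
          · rw [hcov k, Bool.eq_iff_iff]
            simp only [pvCovB_append, pvCovB_cons, pvCovB_nil, hf, hs, Bool.or_false, Bool.or_true,
              Bool.false_or, Bool.true_or, Bool.or_eq_true, Bool.and_eq_true, decide_eq_true_eq]
            try omega

-- flat rendering of a separated interval list from position p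
def pvPieces (s : List Char) : Nat → List (Nat × Nat) → List Char
  | p, [] => s.drop p
  | p, r :: rest =>
      (s.drop p).take (r.1 - p) ++ pvSpanA ((s.drop r.1).take (r.2 - r.1)) ++ pvPieces s r.2 rest

lemma pvJoin_nil_eq_flatten (parts : List (List Char)) :
    PySem.Chars.join [] parts = parts.flatten := by
  simp only [PySem.Chars.join, List.intercalate]
  induction parts with
  | nil => simp
  | cons p parts ih =>
    cases parts with
    | nil => simp
    | cons q parts => simp_all [List.intersperse]

lemma pvBuildA_eq_pieces (s : List Char) :
    ∀ (M : List (Nat × Nat)), pvBuildA s M = pvPieces s 0 M := by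
  have go : ∀ (M : List (Nat × Nat)) (out : List (List Char)) (last : Nat),
      PySem.Chars.join []
        ((M.foldl (fun (p : List (List Char) × Nat) r =>
          (p.1 ++ [PySem.Chars.slice s (some (p.2 : Int)) (some (r.1 : Int)),
                   pvSpanA (PySem.Chars.slice s (some (r.1 : Int)) (some (r.2 : Int)))], r.2))
          (out, last)).1
          ++ [PySem.Chars.slice s
              (some (((M.foldl (fun (p : List (List Char) × Nat) r =>
                (p.1 ++ [PySem.Chars.slice s (some (p.2 : Int)) (some (r.1 : Int)),
                         pvSpanA (PySem.Chars.slice s (some (r.1 : Int)) (some (r.2 : Int)))], r.2))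
                (out, last)).2 : Nat) : Int)) none])
        = out.flatten ++ pvPieces s last M := by
    intro M
    induction M with
    | nil =>
      intro out last
      rw [pvJoin_nil_eq_flatten]
      simp only [List.foldl_nil, List.flatten_append, List.flatten_cons, List.flatten_nil,
        List.append_nil, pvPieces]
      rw [PySem.Chars.slice_eq_listSlice, PySem.List.slice_from_natCast]
    | cons r M ih =>
      intro out last
      simp only [List.foldl_cons]
      rw [ih]
      simp only [pvPieces, List.flatten_append, List.flatten_cons, List.flatten_nil,
        List.append_nil]
      rw [PySem.Chars.slice_eq_listSlice, PySem.List.slice_natCast,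
        PySem.Chars.slice_eq_listSlice, PySem.List.slice_natCast]
      simp [pvSpanA, List.append_assoc]
  intro M
  have := go M [] 0
  simpa [pvBuildA] using this

lemma pvRunEndB_eq (cov : List Bool) (b : Bool) :
    ∀ (fuel j k : Nat), j ≤ k → k - j ≤ fuel →
      (∀ m, j ≤ m → m < k → m < cov.length ∧ cov.getD m false = b) →
      ¬(k < cov.length ∧ cov.getD k false = b) →
      pvRunEndB cov b fuel j = k := by
  intro fuel
  induction fuel with
  | zero => intro j k hjk hf _ _; simp only [pvRunEndB]; omega
  | succ fuel ih =>
    intro j k hjk hf hrun hstop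
    rcases eq_or_lt_of_le hjk with rfl | hlt
    · simp only [pvRunEndB]
      rw [if_neg hstop]
    · simp only [pvRunEndB]
      rw [if_pos ⟨(hrun j le_rfl hlt).1, (hrun j le_rfl hlt).2⟩]
      exact ih (j + 1) k (by omega) (by omega) (fun m hm1 hm2 => hrun m (by omega) hm2) hstop

lemma pvScanB_pieces (s : List Char) (cov : List Bool) (hlen : cov.length = s.length) :
    ∀ (fuel : Nat) (M : List (Nat × Nat)) (p : Nat) (out : List (List Char)),
      (∀ k, p ≤ k → cov.getD k false = pvCovB M k) →
      M.Pairwise (fun a b => a.2 < b.1) →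
      (∀ r ∈ M, r.1 < r.2 ∧ r.2 ≤ s.length) →
      (∀ r ∈ M, p ≤ r.1) →
      p ≤ s.length → s.length - p ≤ fuel →
      (pvScanB s cov fuel p out).flatten = out.flatten ++ pvPieces s p M := by
  intro fuel
  induction fuel with
  | zero =>
    intro M p out hcov hsep hwf hple hp hfuel
    have hpn : p = s.length := by omega
    subst hpn
    cases M with
    | nil => simp [pvScanB, pvPieces]
    | cons r M =>
      exfalso
      have h1 := (hwf r (by simp)).1
      have h2 := (hwf r (by simp)).2
      have h3 := hple r (by simp)
      omega
  | succ fuel ih =>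
    intro M p out hcov hsep hwf hple hp hfuel
    by_cases hpn : p < s.length
    · rw [pvScanB, if_pos hpn]
      simp only []
      cases M with
      | nil =>
        have hfalse : ∀ m, p ≤ m → cov.getD m false = false := by
          intro m hm; rw [hcov m hm]; rfl
        have hj : pvRunEndB cov (cov.getD p false) (cov.length + 1 - p) p = s.length := by
          apply pvRunEndB_eq
          · omega
          · omega
          · intro m hm1 hm2
            exact ⟨by omega, by rw [hfalse m hm1, hfalse p le_rfl]⟩
          · intro hc
            omega
        rw [hj]
        have := ih [] s.length (out ++ [if cov.getD p false then
            "<span style='background-color:#ffec99;color:#000;'>".toList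
              ++ PySem.Chars.slice s (some (p : Int)) (some (s.length : Int)) ++ "</span>".toList
          else PySem.Chars.slice s (some (p : Int)) (some (s.length : Int))])
          (fun k hk => hcov k (by omega)) (by simp) (by simp) (by simp) (by omega) (by omega)
        rw [this]
        rw [hfalse p le_rfl]
        simp only [if_neg (by simp : ¬ false = true)]
        rw [PySem.Chars.slice_eq_listSlice, PySem.List.slice_natCast]
        simp only [pvPieces, List.flatten_append, List.flatten_cons, List.flatten_nil,
          List.append_nil, List.append_assoc]
        rw [List.take_of_length_le (by simp [List.length_drop])]
        simp [List.drop_length]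
      | cons r M =>
        obtain ⟨hrsep, hsep'⟩ := List.pairwise_cons.mp hsep
        have hrwf := hwf r (by simp)
        have hrp := hple r (by simp)
        have hcovlt : ∀ m, p ≤ m → m < r.1 → cov.getD m false = false := by
          intro m hmp hm
          rw [hcov m hmp]
          rw [Bool.eq_false_iff]
          intro hc
          simp only [pvCovB, List.any_eq_true, Bool.and_eq_true, decide_eq_true_eq] at hc
          obtain ⟨q, hq, hq1, hq2⟩ := hc
          rcases List.mem_cons.mp hq with rfl | hq
          · omega
          · have := hrsep q hq
            have := (hwf q (by simp [hq])).1
            omega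
        have hcovin : ∀ m, r.1 ≤ m → m < r.2 → cov.getD m false = true := by
          intro m hm1 hm2
          rw [hcov m (by omega)]
          simp only [pvCovB, List.any_eq_true]
          exact ⟨r, by simp, by simp; omega⟩
        have hcovr2 : r.2 < s.length → cov.getD r.2 false = false := by
          intro hr2
          rw [hcov r.2 (by omega)]
          rw [Bool.eq_false_iff]
          intro hc
          simp only [pvCovB, List.any_eq_true, Bool.and_eq_true, decide_eq_true_eq] at hc
          obtain ⟨q, hq, hq1, hq2⟩ := hc
          rcases List.mem_cons.mp hq with rfl | hq
          · omega
          · have := hrsep q hq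
            omega
        rcases eq_or_lt_of_le hrp with hpr | hpr
        · -- p = r.1 : emit the span up to r.2
          have hbp : cov.getD p false = true := hcovin p (by omega) (by omega)
          have hj : pvRunEndB cov (cov.getD p false) (cov.length + 1 - p) p = r.2 := by
            rw [hbp]
            apply pvRunEndB_eq
            · omega
            · omega
            · intro m hm1 hm2
              exact ⟨by omega, hcovin m (by omega) (by omega)⟩
            · rintro ⟨hc1, hc2⟩
              rw [hcovr2 (by omega)] at hc2
              simp at hc2
          rw [hj, hbp, if_pos rfl]
          have := ih M r.2 (out ++ ["<span style='background-color:#ffec99;color:#000;'>".toList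
              ++ PySem.Chars.slice s (some (p : Int)) (some (r.2 : Int)) ++ "</span>".toList])
            (fun k hk => by
              rw [hcov k (by omega), Bool.eq_iff_iff]
              simp only [pvCovB, List.any_eq_true, Bool.and_eq_true, decide_eq_true_eq,
                List.mem_cons]
              constructor
              · rintro ⟨q, (rfl | hq), hq1, hq2⟩
                · omega
                · exact ⟨q, hq, hq1, hq2⟩
              · rintro ⟨q, hq, hq1, hq2⟩
                exact ⟨q, Or.inr hq, hq1, hq2⟩)
            hsep' (fun q hq => hwf q (by simp [hq]))
            (fun q hq => by have := hrsep q hq; omega) (by omega) (by omega)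
          rw [this]
          simp only [pvPieces, List.flatten_append, List.flatten_cons, List.flatten_nil,
            List.append_nil, List.append_assoc]
          rw [PySem.Chars.slice_eq_listSlice, PySem.List.slice_natCast]
          subst hpr
          simp [pvSpanA, List.append_assoc]
        · -- p < r.1 : emit the plain segment up to r.1
          have hbp : cov.getD p false = false := hcovlt p le_rfl hpr
          have hj : pvRunEndB cov (cov.getD p false) (cov.length + 1 - p) p = r.1 := by
            rw [hbp]
            apply pvRunEndB_eq
            · omega
            · omega
            · intro m hm1 hm2
              exact ⟨by omega, hcovlt m (by omega) (by omega)⟩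
            · rintro ⟨hc1, hc2⟩
              rw [hcovin r.1 le_rfl (by omega)] at hc2
              simp at hc2
          rw [hj, hbp, if_neg (by simp : ¬ false = true)]
          have := ih (r :: M) r.1 (out ++ [PySem.Chars.slice s (some (p : Int)) (some (r.1 : Int))])
            (fun k hk => hcov k (by omega)) hsep hwf
            (fun q hq => by
              rcases List.mem_cons.mp hq with rfl | hq
              · omega
              · have := hrsep q hq; omega)
            (by omega) (by omega)
          rw [this]
          simp only [pvPieces, List.flatten_append, List.flatten_cons, List.flatten_nil,
            List.append_nil, List.append_assoc]
          rw [PySem.Chars.slice_eq_listSlice, PySem.List.slice_natCast]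
          have hre : r.1 - r.1 = 0 := by omega
          rw [hre]
          simp only [List.take_zero, List.nil_append]
    · rw [pvScanB, if_neg hpn]
      have hpn' : p = s.length := by omega
      subst hpn'
      cases M with
      | nil => simp [pvPieces]
      | cons r M =>
        exfalso
        have h1 := (hwf r (by simp)).1
        have h2 := (hwf r (by simp)).2
        have h3 := hple r (by simp)
        omega

lemma pvTokStep_eq (t : String) :
    pvTokStepA t = (match pvTokenHighlightB t with | none => [] | some v => [v]) := by
  simp only [pvTokStepA, pvTokenHighlightB]
  split_ifs <;> rfl

lemma pvHighlights_eq (tokens : List String) : pvHighlightsA tokens = pvHighlightsB tokens := by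
  unfold pvHighlightsA pvHighlightsB
  rw [PySem.List.foldl_append_eq_flatMap]
  simp only [List.nil_append]
  induction tokens with
  | nil => simp
  | cons t ts ih =>
    simp only [List.flatMap_cons, List.map_cons, List.filterMap_cons]
    rw [pvTokStep_eq t, ih]
    rcases pvTokenHighlightB t with _ | v <;> simp

lemma pvHighlightsA_nonempty (tokens : List String)
    (h : ∀ t ∈ tokens, PySem.Chars.strip t.toList ≠ ['"'] ∧ PySem.Chars.strip t.toList ≠ ['"', '"']) :
    ∀ x ∈ pvHighlightsA tokens, x ≠ [] := by
  unfold pvHighlightsA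
  rw [PySem.List.foldl_append_eq_flatMap]
  simp only [List.nil_append]
  intro x hx
  obtain ⟨t, ht, hxt⟩ := List.mem_flatMap.mp hx
  obtain ⟨hne1, hne2⟩ := h t ht
  revert hxt
  simp only [pvTokStepA]
  split_ifs with h0 hq hc hv
  · simp
  · -- quoted token: strip t has length ≥ 3, the slice keeps length-2 ≥ 1 chars
    simp only [List.mem_singleton]
    rintro rfl
    simp only [Bool.and_eq_true] at hq
    obtain ⟨u, hu⟩ := (PySem.Chars.startswith_iff _ _).mp hq.1
    obtain ⟨w, hw⟩ := (PySem.Chars.endswith_iff _ _).mp hq.2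
    set t' := PySem.Chars.strip t.toList with ht'
    have hlen3 : 3 ≤ t'.length := by
      rcases u with _ | ⟨b, u⟩
      · exfalso; apply hne1; rw [← hu]; rfl
      · rcases u with _ | ⟨c, u⟩
        · exfalso
          apply hne2
          have h2 : t'.length = 2 := by rw [← hu]; rfl
          rcases w with _ | ⟨d, w⟩
          · exfalso; rw [← hw] at h2; simp at h2
          · rcases w with _ | ⟨e, w⟩
            · -- t' = [d, '"'] and t' = ['"', b] : so d = '"' and b = '"'
              rw [← hw] at hu
              simp at hu
              rw [← hw, hu.1]
              rfl
            · exfalso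
              rw [← hw] at h2
              simp at h2
        · rw [← hu]; simp
    intro hnil
    have : (PySem.Chars.slice t' (some 1) (some (-1))).length = 0 := by rw [hnil]; rfl
    rw [PySem.Chars.slice_eq_listSlice, PySem.List.length_slice] at this
    have hc1 : PySem.List.clampIdx t'.length (-1) = t'.length - 1 := by
      simp
    have hc2 : PySem.List.clampIdx t'.length 1 = 1 := by
      have : ((1 : Nat) : Int) = (1 : Int) := by norm_num
      rw [← this, PySem.List.clampIdx_natCast]
      omega
    rw [hc1, hc2] at this
    omega
  · simp only [List.mem_singleton]
    rintro rfl
    exact hv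
  · simp
  · simp only [List.mem_singleton]
    rintro rfl
    exact h0

lemma pvLower_length (l : List Char) : (PySem.Chars.lower l).length = l.length := by
  simp [PySem.Chars.lower]

lemma pvHighlightText_eq (H : List (List Char)) (hH : ∀ x ∈ H, x ≠ []) (t : String) :
    pvHighlightTextA H t = pvHighlightTextB H t := by
  simp only [pvHighlightTextA, pvHighlightTextB]
  by_cases h0 : t.toList = [] ∨ H = []
  · rw [if_pos h0, if_pos h0]
  · rw [if_neg h0, if_neg h0]
    congr 1
    have hlow : (PySem.Chars.lower t.toList).length = t.toList.length := pvLower_length _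
    have hHlow : ∀ h ∈ H, PySem.Chars.lower h ≠ [] := by
      intro h hh hc
      apply hH h hh
      have h1 : (PySem.Chars.lower h).length = 0 := by rw [hc]; rfl
      rw [pvLower_length] at h1
      exact List.eq_nil_of_length_eq_zero h1
    set lower := PySem.Chars.lower t.toList with hlowdef
    set R := H.foldl
      (fun acc h => pvFindLoopA lower (PySem.Chars.lower h) (lower.length + 1) 0 acc) [] with hR
    have hRwf : ∀ r ∈ R, r.1 < r.2 ∧ r.2 ≤ lower.length :=
      pvFold_find_wf lower H hHlow [] (by simp)
    obtain ⟨hmlen, hmgetD⟩ := pvFold_mark_eq_find lower H hHlow [] (List.replicate t.toList.length false)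
      (by simp [hlow]) (fun k => by
        rw [List.getD_eq_getElem?_getD, List.getElem?_replicate]
        split_ifs <;> rfl)
    set So := PySem.List.sorted2 R (fun r => r.1) (fun r => r.2) with hSo
    have hperm : So.Perm R := PySem.List.sorted2_perm R (fun r => r.1) (fun r => r.2) false
    have hSwf : ∀ r ∈ So, r.1 < r.2 ∧ r.2 ≤ lower.length := fun r hr =>
      hRwf r (hperm.mem_iff.mp hr)
    have hSpw := pvSorted2_pairwise_fst R
    obtain ⟨⟨hMsep, hMwf⟩, hMcov⟩ := pvMerge_go lower.length So [] hSpw hSwf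
      (by simp) (by simp) (fun x _ m hm => by simp at hm)
    rw [pvBuildA_eq_pieces, pvJoin_nil_eq_flatten]
    have hcovmask : ∀ k, (H.foldl
        (fun c h => pvMarkLoopB lower (PySem.Chars.lower h) (lower.length + 1) 0 c)
        (List.replicate t.toList.length false)).getD k false = pvCovB (pvMergeA So) k := by
      intro k
      rw [hmgetD k]
      have e1 : pvCovB R k = pvCovB So k := (pvCovB_perm hperm k).symm
      have e2 := hMcov k
      simp only [pvCovB_nil, Bool.false_or] at e2
      rw [e1, ← e2]
      rfl
    have := pvScanB_pieces t.toList
      (H.foldl (fun c h => pvMarkLoopB lower (PySem.Chars.lower h) (lower.length + 1) 0 c)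
        (List.replicate t.toList.length false))
      (by rw [hmlen, hlow])
      t.toList.length (pvMergeA So) 0 []
      (fun k _ => hcovmask k)
      hMsep
      (fun r hr => by have := hMwf r hr; omega)
      (fun r hr => by omega)
      (by omega) (by omega)
    rw [this]
    simp

-- ===== VERDICT (by name: the statement is the Claim_ definition above) =====
theorem build_highlight_html_py_spec : Claim_equal_build_highlight_html_py := by
  intro texts tokens _ hpre
  unfold Spec_build_highlight_html_py
  unfold build_highlight_html_py build_highlight_html_py_alt
  rcases hpre with hpre | hpre
  · rw [← pvHighlights_eq]
    exact List.map_congr_left fun t _ =>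
      pvHighlightText_eq _ (pvHighlightsA_nonempty tokens hpre) t
  · apply List.map_congr_left
    intro t ht
    have : t = "" := hpre t ht
    subst this
    simp [pvHighlightTextA, pvHighlightTextB]
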